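-- pv_equiv track=rewrite | github.com/THB-SCALE-C/evaluation | evaluation/judges/pointwise/binary/formality/cloze_text/rule_check.py | has_adjacent_blanks
-- ===== SOURCE A (Python) =====
-- def has_adjacent_blanks(text:str):
--     separators = ("", ", ", " and ", " or ")
--     words_next_to_each_other = False
--     i = 0
--     while True:
--         start = text.find("*", i)
--         if start == -1:
--             break
--         end = text.find("*", start + 1)
--         if end == -1:
--             break
--         for sep in separators:
--             if text.startswith(sep + "*", end + 1):
--                 next_start = end + 1 + len(sep)
--                 next_end = text.find("*", next_start + 1)
--                 if next_end != -1:
--                     words_next_to_each_other = True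
--                     break
--         if words_next_to_each_other:
--             break
--         i = end + 1
--     return words_next_to_each_other
-- ===== SOURCE B (Python) =====
-- def has_adjacent_blanks(text: str):
--     separators = ("", ", ", " and ", " or ")
--     stars = [i for i, c in enumerate(text) if c == "*"]
--     # pair consecutive star positions greedily; a trailing unpaired star is dropped
--     it = iter(stars)
--     blanks = list(zip(it, it))
--     return any(text[e + 1:s2] in separators
--                for (_, e), (s2, _) in zip(blanks, blanks[1:]))
-- ===== Notes on version B (the rewrite author's own statement) =====
-- stated objective: simpler
-- what changed: A interleaves find-next-star probes, per-separator startswith tests and a manual cursor advance inside a while-True loop; B first builds the index of all asterisk positions, greedily pairs them into blank spans, and then checks whether the text strictly between any two consecutive spans is one of the four separators.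
import Mathlib
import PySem

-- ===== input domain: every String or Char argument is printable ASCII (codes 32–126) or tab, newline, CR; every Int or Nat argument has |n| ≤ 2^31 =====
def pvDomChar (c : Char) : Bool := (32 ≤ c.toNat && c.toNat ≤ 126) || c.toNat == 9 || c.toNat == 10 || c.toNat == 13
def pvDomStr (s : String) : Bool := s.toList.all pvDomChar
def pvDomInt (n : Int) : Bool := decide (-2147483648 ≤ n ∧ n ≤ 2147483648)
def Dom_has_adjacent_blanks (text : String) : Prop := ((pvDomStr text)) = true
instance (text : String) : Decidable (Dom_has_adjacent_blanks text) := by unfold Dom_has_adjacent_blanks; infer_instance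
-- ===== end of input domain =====

-- B replaces A's interleaved find/startswith/advance walk by building the list of '*'
-- positions once, pairing them into blank spans, and checking the gap between
-- consecutive spans (objective: a simpler decomposition; same asymptotic cost).

-- the separator tuple, identical literal in both sources
def pvSeparators : List (List Char) := [[], [',', ' '], [' ', 'a', 'n', 'd', ' '], [' ', 'o', 'r', ' ']]

-- ===== PORT A =====
-- the 'while True' loop; the cursor i strictly increases by at least 2 per iteration,
-- so fuel = len(text) + 1 is never exhausted
def pvAGo (s : List Char) (i : Int) : Nat → Bool
  | 0 => false
  | fuel + 1 =>
    let start := PySem.Chars.findFrom s ['*'] i none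
    if start = -1 then false
    else
      let e := PySem.Chars.findFrom s ['*'] (start + 1) none
      if e = -1 then false
      else
        -- 'for sep in separators: if text.startswith(sep + "*", end + 1) and ...: break';
        -- text.startswith(p, end+1) is exact as startswith on s[end+1:] since 0 ≤ end+1 ≤ len(s)
        let hit := pvSeparators.any (fun sep =>
          PySem.Chars.startswith (s.drop (e + 1).toNat) (sep ++ ['*']) &&
          (PySem.Chars.findFrom s ['*'] (e + 1 + (sep.length : Int) + 1) none != -1))
        if hit then true else pvAGo s (e + 1) fuel

def has_adjacent_blanks (text : String) : Bool :=
  pvAGo text.toList 0 (text.toList.length + 1)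

-- ===== PORT B =====
-- it = iter(stars); blanks = list(zip(it, it)) — pairs consecutive elements, dropping a
-- trailing unpaired one; ported exactly as this structural pairing recursion
def pvPairUp : List Int → List (Int × Int)
  | a :: b :: rest => (a, b) :: pvPairUp rest
  | _ => []

-- stars = [i for i, c in enumerate(text) if c == '*']
def pvStars (s : List Char) : List Int :=
  ((PySem.List.enumerate s 0).filter (fun p => p.2 == '*')).map (fun p => p.1)

-- any(text[e + 1:s2] in separators for (_, e), (s2, _) in zip(blanks, blanks[1:]))
def has_adjacent_blanks_alt (text : String) : Bool :=
  let s := text.toList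
  let blanks := pvPairUp (pvStars s)
  (List.zip blanks (PySem.List.slice blanks (some 1) none)).any (fun p =>
    pvSeparators.contains (PySem.List.slice s (some (p.1.2 + 1)) (some p.2.1)))

-- ===== PRECONDITION & SPEC =====
def Spec_has_adjacent_blanks (text : String) (out : Bool) : Prop := out = has_adjacent_blanks_alt text
instance (text : String) (out : Bool) : Decidable (Spec_has_adjacent_blanks text out) := by unfold Spec_has_adjacent_blanks; infer_instance

-- ===== CLAIM (what is proved, stated in full; the proofs are below) =====
def Claim_equal_has_adjacent_blanks : Prop := ∀ (text : String), Dom_has_adjacent_blanks text → Spec_has_adjacent_blanks text (has_adjacent_blanks text)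

-- ===== LEMMAS AND PROOFS =====

-- the star positions of s that are ≥ k
def pvStFrom (s : List Char) (k : Nat) : List Int :=
  (pvStars s).filter (fun j => decide ((k : Int) ≤ j))

-- the gap test B applies between the closing star e of a blank and the opening star c of the next
def pvGap (s : List Char) (e c : Int) : Bool :=
  pvSeparators.contains (PySem.List.slice s (some (e + 1)) (some c))

-- B's pairwise-any over a blanks list, as a named function (definitionally B's body)
def pvBlanksAny (s : List Char) (blanks : List (Int × Int)) : Bool :=
  (List.zip blanks (PySem.List.slice blanks (some 1) none)).any (fun p =>
    pvSeparators.contains (PySem.List.slice s (some (p.1.2 + 1)) (some p.2.1)))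

theorem mem_pvStars {s : List Char} {j : Int} :
    j ∈ pvStars s ↔ ∃ (n : Nat) (_ : n < s.length), j = (n : Int) ∧ s[n] = '*' := by
  simp [pvStars, PySem.List.mem_enumerate_iff]

theorem pairwise_pvStars (s : List Char) : (pvStars s).Pairwise (· < ·) :=
  ((PySem.List.pairwise_lt_enumerate s 0).filter _).map _ (fun _ _ h => h)

theorem mem_pvStFrom {s : List Char} {k : Nat} {j : Int} :
    j ∈ pvStFrom s k ↔ (k : Int) ≤ j ∧ j ∈ pvStars s := by
  simp [pvStFrom, List.mem_filter, and_comm]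

theorem pairwise_pvStFrom (s : List Char) (k : Nat) : (pvStFrom s k).Pairwise (· < ·) :=
  (pairwise_pvStars s).filter _

theorem pfx_star (s : List Char) (n : Nat) : ['*'] <+: s.drop n ↔ ∃ (_ : n < s.length), s[n] = '*' := by
  constructor
  · rintro ⟨u, hu⟩
    have hlen : n < s.length := by
      have := congrArg List.length hu
      simp [List.length_drop] at this; omega
    refine ⟨hlen, ?_⟩
    have h0 : (s.drop n)[0]? = some '*' := by rw [← hu]; rfl
    rw [List.getElem?_drop, List.getElem?_eq_some_iff] at h0
    obtain ⟨_, h0⟩ := h0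
    exact h0
  · rintro ⟨h, hs⟩
    refine ⟨s.drop (n+1), ?_⟩
    have : s.drop n = s[n] :: s.drop (n+1) := List.drop_eq_getElem_cons h
    simp [this, hs]

theorem mem_drop_star (s : List Char) (k : Nat) (c : Char) :
    c ∈ s.drop k ↔ ∃ n, k ≤ n ∧ ∃ (_ : n < s.length), s[n] = c := by
  rw [List.mem_iff_getElem]
  constructor
  · rintro ⟨m, hm, h⟩
    have hm' : m < s.length - k := by simpa [List.length_drop] using hm
    exact ⟨k + m, by omega, by omega, by rw [← List.getElem_drop]; exact h⟩
  · rintro ⟨n, hkn, hn, h⟩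
    have hm : n - k < (s.drop k).length := by simp [List.length_drop]; omega
    refine ⟨n - k, hm, ?_⟩
    rw [List.getElem_drop]
    have : k + (n - k) = n := by omega
    simp only [this]; exact h

-- a star at position ≥ k exists iff pvStFrom s k is nonempty
theorem infix_iff_stfrom (s : List Char) (k : Nat) :
    ['*'] <:+: s.drop k ↔ pvStFrom s k ≠ [] := by
  rw [List.singleton_infix_iff, mem_drop_star, ← List.isEmpty_eq_false_iff,
    List.isEmpty_eq_false_iff_exists_mem]
  constructor
  · rintro ⟨n, hkn, hn, h⟩
    exact ⟨(n : Int), mem_pvStFrom.mpr ⟨by exact_mod_cast hkn, mem_pvStars.mpr ⟨n, hn, rfl, h⟩⟩⟩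
  · rintro ⟨j, hj⟩
    obtain ⟨hk, hj⟩ := mem_pvStFrom.mp hj
    obtain ⟨n, hn, rfl, h⟩ := mem_pvStars.mp hj
    exact ⟨n, by exact_mod_cast hk, hn, h⟩

-- text.find('*', k) returns the first star position ≥ k, or -1
theorem pvFF (s : List Char) (k : Nat) (hk : k ≤ s.length) :
    PySem.Chars.findFrom s ['*'] (k : Int) none = (pvStFrom s k).headD (-1) := by
  cases hS : pvStFrom s k with
  | nil =>
    rw [(PySem.Chars.findFrom_natCast_eq_neg_one_iff s ['*'] k hk).mpr]
    · rfl
    · rw [infix_iff_stfrom]; simp [hS]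
  | cons a t =>
    have hne : PySem.Chars.findFrom s ['*'] (k : Int) none ≠ -1 := by
      rw [Ne, PySem.Chars.findFrom_natCast_eq_neg_one_iff s ['*'] k hk, not_not, infix_iff_stfrom, hS]
      simp only [ne_eq, reduceCtorEq, not_false_eq_true]
    obtain ⟨hkr, hpfx, hmin⟩ := PySem.Chars.findFrom_natCast_spec s ['*'] k hk hne
    set r := PySem.Chars.findFrom s ['*'] (k : Int) none with hr
    have hr0 : (0 : Int) ≤ r := le_trans (by exact_mod_cast Nat.zero_le k) hkr
    
    obtain ⟨hrlen, hrstar⟩ := (pfx_star s r.toNat).mp hpfx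
    have hrmem : (r.toNat : Int) ∈ pvStFrom s k := by
      refine mem_pvStFrom.mpr ⟨?_, mem_pvStars.mpr ⟨r.toNat, hrlen, rfl, hrstar⟩⟩
      omega
    have hamem : a ∈ pvStFrom s k := by rw [hS]; exact List.mem_cons_self
    obtain ⟨hka, hastars⟩ := mem_pvStFrom.mp hamem
    obtain ⟨n, hn, rfl, hnstar⟩ := mem_pvStars.mp hastars
    have h1 : ¬ ((n : Int) < r) := by
      intro hlt
      exact hmin n (by exact_mod_cast hka) (by omega) ((pfx_star s n).mpr ⟨hn, hnstar⟩)
    have h2 : (n : Int) ≤ (r.toNat : Int) := by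
      rcases List.mem_cons.mp (by rw [hS] at hrmem; exact hrmem :
          (r.toNat : Int) ∈ (n : Int) :: t) with h | h
      · omega
      · have := pairwise_pvStFrom s k
        rw [hS] at this
        have := (List.pairwise_cons.mp this).1 _ h
        omega
    simp only [List.headD_cons]
    omega

theorem star_not_mem_sep : ∀ sep ∈ pvSeparators, '*' ∉ sep := by decide

theorem pvStFrom_tail (s : List Char) (k n : Nat) (t : List Int)
    (hS : pvStFrom s k = (n : Int) :: t) : pvStFrom s (n + 1) = t := by
  have hkn : (k : Int) ≤ (n : Int) := (mem_pvStFrom.mp (hS ▸ List.mem_cons_self)).1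
  have h1 : pvStFrom s (n + 1) = (pvStFrom s k).filter (fun j => decide (((n : Nat) + 1 : Int) ≤ j)) := by
    unfold pvStFrom
    rw [List.filter_filter]
    apply List.filter_congr
    intro x _
    by_cases h : ((n : Nat) + 1 : Int) ≤ x
    · have hk : (k : Int) ≤ x := by omega
      simp [h, hk]
    · simp [h]
  rw [h1, hS]
  have hne : ¬ (((n : Nat) + 1 : Int) ≤ (n : Int)) := by omega
  rw [List.filter_cons_of_neg (by simpa using hne)]
  apply List.filter_eq_self.mpr
  intro x hx
  have hpw := pairwise_pvStFrom s k
  rw [hS] at hpw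
  have := (List.pairwise_cons.mp hpw).1 x hx
  simp; omega

theorem pvStFrom_head (s : List Char) (k c : Nat) (hc : (c : Int) ∈ pvStFrom s k)
    (hmin : ∀ x ∈ pvStFrom s k, (c : Int) ≤ x) :
    pvStFrom s k = (c : Int) :: pvStFrom s (c + 1) := by
  cases hS : pvStFrom s k with
  | nil => rw [hS] at hc; cases hc
  | cons a t =>
    have hac : (c : Int) ≤ a := hmin a (hS ▸ List.mem_cons_self)
    have hca : a = (c : Int) := by
      rw [hS] at hc
      rcases List.mem_cons.mp hc with h | h
      · omega
      · have hpw := pairwise_pvStFrom s k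
        rw [hS] at hpw
        have := (List.pairwise_cons.mp hpw).1 _ h
        omega
    subst hca
    rw [pvStFrom_tail s k c t hS]

-- if sep + '*' occurs right after position m, the next star is at m+1+len(sep)
-- and the text strictly between is exactly sep
theorem key_fwd (s : List Char) (m : Nat) (sep : List Char) (hsep : sep ∈ pvSeparators)
    (hpfx : sep ++ ['*'] <+: s.drop (m + 1)) :
    m + 1 + sep.length < s.length ∧
    pvStFrom s (m + 1) = ((m + 1 + sep.length : Nat) : Int) :: pvStFrom s (m + 1 + sep.length + 1) ∧
    PySem.List.slice s (some ((m : Int) + 1)) (some ((m + 1 + sep.length : Nat) : Int)) = sep := by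
  obtain ⟨u, hu⟩ := hpfx
  rw [List.append_assoc] at hu
  have hlen : sep.length + (1 + u.length) = s.length - (m + 1) ∧ m + 1 ≤ s.length := by
    have := congrArg List.length hu
    simp [List.length_drop] at this
    omega
  have hc : m + 1 + sep.length < s.length := by omega
  have h1 : s[m + 1 + sep.length]? = some '*' := by
    rw [show m + 1 + sep.length = (m + 1) + sep.length from rfl, ← List.getElem?_drop, ← hu,
      List.getElem?_append_right (le_refl _)]
    simp
  have hstar : s[m + 1 + sep.length]'hc = '*' := by
    obtain ⟨_, h⟩ := List.getElem?_eq_some_iff.mp h1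
    exact h
  have hnostar : ∀ j, m + 1 ≤ j → j < m + 1 + sep.length → ∀ (hjl : j < s.length), s[j]'hjl ≠ '*' := by
    intro j h2 h3 hjl
    have hidx : j - (m + 1) < sep.length := by omega
    have h4 : s[j]? = sep[j - (m + 1)]? := by
      rw [show j = (m + 1) + (j - (m + 1)) by omega, ← List.getElem?_drop, ← hu,
        List.getElem?_append_left hidx]
      congr 1; omega
    intro hcon
    have h5 : sep[j - (m + 1)]? = some '*' := by
      rw [← h4, List.getElem?_eq_some_iff]
      exact ⟨hjl, hcon⟩
    obtain ⟨_, h6⟩ := List.getElem?_eq_some_iff.mp h5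
    exact star_not_mem_sep sep hsep (h6 ▸ List.getElem_mem _)
  have hmem : ((m + 1 + sep.length : Nat) : Int) ∈ pvStFrom s (m + 1) :=
    mem_pvStFrom.mpr ⟨by push_cast; omega, mem_pvStars.mpr ⟨_, hc, rfl, hstar⟩⟩
  have hmin : ∀ x ∈ pvStFrom s (m + 1), ((m + 1 + sep.length : Nat) : Int) ≤ x := by
    intro x hx
    obtain ⟨hkx, hxs⟩ := mem_pvStFrom.mp hx
    obtain ⟨j, hjl, rfl, hjstar⟩ := mem_pvStars.mp hxs
    by_contra hlt
    exact hnostar j (by exact_mod_cast hkx) (by omega) hjl hjstar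
  refine ⟨hc, pvStFrom_head s (m + 1) _ hmem hmin, ?_⟩
  have h4 : ((m : Int) + 1) = ((m + 1 : Nat) : Int) := by push_cast; ring
  rw [h4, PySem.List.slice_natCast]
  have h5 : m + 1 + sep.length - (m + 1) = sep.length := by omega
  rw [h5, ← hu, List.take_left]

-- conversely, if the text between position m and the star at j equals sep,
-- then sep + '*' occurs right after m
theorem key_bwd (s : List Char) (m j : Nat) (sep : List Char) (hj : j < s.length)
    (hstar : s[j]'hj = '*') (hmj : m + 1 ≤ j)
    (hslice : PySem.List.slice s (some ((m : Int) + 1)) (some ((j : Nat) : Int)) = sep) :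
    sep ++ ['*'] <+: s.drop (m + 1) ∧ sep.length = j - (m + 1) := by
  have h4 : ((m : Int) + 1) = ((m + 1 : Nat) : Int) := by push_cast; ring
  rw [h4, PySem.List.slice_natCast] at hslice
  have hlsep : sep.length = j - (m + 1) := by
    have := congrArg List.length hslice
    simp [List.length_take, List.length_drop] at this
    omega
  have hdecomp : s.drop (m + 1) = sep ++ '*' :: s.drop (j + 1) := by
    conv_lhs => rw [← List.take_append_drop (j - (m + 1)) (s.drop (m + 1))]
    rw [hslice, List.drop_drop]
    have h6 : m + 1 + (j - (m + 1)) = j := by omega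
    rw [h6, List.drop_eq_getElem_cons hj, hstar]
  exact ⟨⟨s.drop (j + 1), by rw [List.append_assoc]; exact hdecomp.symm⟩, hlsep⟩

-- A's inner separator loop succeeds at closing star m exactly when the next two
-- stars exist and B's gap test accepts the text up to the next opening star
theorem hit_eq (s : List Char) (m : Nat) :
    (pvSeparators.any (fun sep =>
        PySem.Chars.startswith (s.drop ((m : Int) + 1).toNat) (sep ++ ['*']) &&
        (PySem.Chars.findFrom s ['*'] ((m : Int) + 1 + (sep.length : Int) + 1) none != -1)))
    = (match pvStFrom s (m + 1) with
       | c :: _ :: _ => pvGap s (m : Int) c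
       | _ => false) := by
  have htoNat : ((m : Int) + 1).toNat = m + 1 := by omega
  rw [htoNat]
  cases hL : pvStFrom s (m + 1) with
  | nil =>
    apply List.any_eq_false.mpr
    intro sep hsep
    simp only [Bool.and_eq_true, not_and]
    intro hsw _
    have hpfx := (PySem.Chars.startswith_iff _ _).mp hsw
    have := (key_fwd s m sep hsep hpfx).2.1
    rw [hL] at this; cases this
  | cons c t =>
    cases t with
    | nil =>
      apply List.any_eq_false.mpr
      intro sep hsep
      simp only [Bool.and_eq_true, not_and]
      intro hsw hff
      obtain ⟨hc, hhead, _⟩ := key_fwd s m sep hsep ((PySem.Chars.startswith_iff _ _).mp hsw)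
      rw [hL] at hhead
      obtain ⟨hceq, htail⟩ := List.cons.inj hhead
      have harg : (m : Int) + 1 + (sep.length : Int) + 1 = ((m + 1 + sep.length + 1 : Nat) : Int) := by
        push_cast; ring
      rw [harg] at hff
      rw [(PySem.Chars.findFrom_natCast_eq_neg_one_iff s ['*'] _ (by omega)).mpr
        (by rw [infix_iff_stfrom, ← htail]; simp)] at hff
      simp at hff
    | cons d t' =>
      have hmemc : c ∈ pvStFrom s (m + 1) := hL ▸ List.mem_cons_self
      obtain ⟨hmc, hcs⟩ := mem_pvStFrom.mp hmemc
      obtain ⟨j, hjl, rfl, hjstar⟩ := mem_pvStars.mp hcs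
      have hmj : m + 1 ≤ j := by exact_mod_cast hmc
      change _ = pvGap s (m : Int) ((j : Nat) : Int)
      cases hg : pvGap s (m : Int) ((j : Nat) : Int) with
      | true =>
        apply List.any_eq_true.mpr
        have hsl : PySem.List.slice s (some ((m : Int) + 1)) (some ((j : Nat) : Int)) ∈ pvSeparators := by
          have := hg
          unfold pvGap at this
          simpa using this
        refine ⟨_, hsl, ?_⟩
        obtain ⟨hpfx, hlsep⟩ := key_bwd s m j _ hjl hjstar hmj rfl
        rw [Bool.and_eq_true]
        constructor
        · rw [PySem.Chars.startswith_iff]; exact hpfx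
        · have harg : (m : Int) + 1 + (((PySem.List.slice s (some ((m : Int) + 1)) (some ((j : Nat) : Int))).length : Int)) + 1 = ((j + 1 : Nat) : Int) := by
            rw [hlsep]; push_cast; omega
          rw [harg]
          simp only [bne_iff_ne, Ne]
          rw [PySem.Chars.findFrom_natCast_eq_neg_one_iff s ['*'] _ (by omega), not_not,
            infix_iff_stfrom, pvStFrom_tail s (m + 1) j _ hL]
          simp
      | false =>
        apply List.any_eq_false.mpr
        intro sep hsep
        simp only [Bool.and_eq_true, not_and]
        intro hsw _
        obtain ⟨hc, hhead, hslice⟩ := key_fwd s m sep hsep ((PySem.Chars.startswith_iff _ _).mp hsw)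
        rw [hL] at hhead
        obtain ⟨hceq, _⟩ := List.cons.inj hhead
        rw [← hceq] at hslice
        have : pvGap s (m : Int) ((j : Nat) : Int) = true := by
          unfold pvGap
          simp only [hslice]
          simpa using hsep
        rw [hg] at this; cases this

theorem pvBlanksAny_nil (s : List Char) : pvBlanksAny s [] = false := rfl

theorem pvBlanksAny_single (s : List Char) (x : Int × Int) : pvBlanksAny s [x] = false := rfl

theorem pvBlanksAny_cons (s : List Char) (x q : Int × Int) (bl : List (Int × Int)) :
    pvBlanksAny s (x :: q :: bl) = (pvGap s x.2 q.1 || pvBlanksAny s (q :: bl)) := by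
  simp [pvBlanksAny, pvGap, PySem.List.slice_from_one]

-- the loop invariant: A's walk from cursor k computes B's pairwise gap check
-- on the stars at positions ≥ k
theorem pvMain (s : List Char) : ∀ (fuel : Nat) (k : Nat), k ≤ s.length →
    (pvStFrom s k).length < fuel →
    pvAGo s (k : Int) fuel = pvBlanksAny s (pvPairUp (pvStFrom s k)) := by
  intro fuel
  induction fuel with
  | zero => intro k _ h; omega
  | succ fuel ih =>
    intro k hk hlen
    simp only [pvAGo]
    rw [pvFF s k hk]
    cases hL : pvStFrom s k with
    | nil => simp [pvPairUp, pvBlanksAny_nil]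
    | cons a t =>
      obtain ⟨hka, has⟩ := mem_pvStFrom.mp (hL ▸ List.mem_cons_self)
      obtain ⟨n, hnl, rfl, hnstar⟩ := mem_pvStars.mp has
      rw [if_neg (by simp only [List.headD_cons]; omega : ¬ (((n : Nat) : Int) :: t).headD (-1) = -1)]
      simp only [List.headD_cons]
      have hn1 : ((n : Nat) : Int) + 1 = ((n + 1 : Nat) : Int) := by push_cast; ring
      rw [hn1, pvFF s (n + 1) (by omega), pvStFrom_tail s k n t hL]
      cases ht : t with
      | nil => simp [pvPairUp, pvBlanksAny_nil]
      | cons b t2 =>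
        rw [ht] at hL
        obtain ⟨hkb, hbs⟩ := mem_pvStFrom.mp (pvStFrom_tail s k n _ hL ▸ List.mem_cons_self)
        obtain ⟨m, hml, rfl, hmstar⟩ := mem_pvStars.mp hbs
        rw [if_neg (by simp only [List.headD_cons]; omega : ¬ (((m : Nat) : Int) :: t2).headD (-1) = -1)]
        simp only [List.headD_cons]
        have ht2 : pvStFrom s (m + 1) = t2 :=
          pvStFrom_tail s (n + 1) m t2 (pvStFrom_tail s k n _ hL)
        rw [hit_eq s m, ht2]
        have hm1 : ((m : Nat) : Int) + 1 = ((m + 1 : Nat) : Int) := by push_cast; ring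
        have hrec : pvAGo s (((m : Nat) : Int) + 1) fuel = pvBlanksAny s (pvPairUp t2) := by
          rw [hm1, ih (m + 1) (by omega) (by rw [ht2]; rw [hL] at hlen; simp at hlen; omega), ht2]
        cases t2 with
        | nil => simp [hrec, pvPairUp, pvBlanksAny_nil, pvBlanksAny_single]
        | cons c t3 =>
          cases t3 with
          | nil =>
            simp only [pvPairUp]
            rw [if_neg (by simp)]
            simp [hrec, pvPairUp, pvBlanksAny_nil, pvBlanksAny_single]
          | cons d t4 =>
            simp only [pvPairUp, pvBlanksAny_cons]
            rw [hrec]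
            simp only [pvPairUp]
            cases pvGap s ((m : Nat) : Int) c <;> simp

theorem pvStFrom_zero (s : List Char) : pvStFrom s 0 = pvStars s := by
  apply List.filter_eq_self.mpr
  intro j hj
  obtain ⟨n, _, rfl, _⟩ := mem_pvStars.mp hj
  simp

theorem pvStars_length_le (s : List Char) : (pvStars s).length ≤ s.length := by
  unfold pvStars
  calc _ = ((PySem.List.enumerate s 0).filter _).length := List.length_map ..
    _ ≤ (PySem.List.enumerate s 0).length := List.length_filter_le _ _
    _ = s.length := PySem.List.length_enumerate ..

-- ===== VERDICT (by name: the statement is the Claim_ definition above) =====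
theorem has_adjacent_blanks_spec : Claim_equal_has_adjacent_blanks := by
  intro text _
  unfold Spec_has_adjacent_blanks has_adjacent_blanks has_adjacent_blanks_alt
  have h := pvMain text.toList (text.toList.length + 1) 0 (Nat.zero_le _)
    (by rw [pvStFrom_zero]; have := pvStars_length_le text.toList; omega)
  rw [pvStFrom_zero] at h
  rw [show (0 : Int) = ((0 : Nat) : Int) from rfl]
  exact h.trans (by simp [pvBlanksAny])
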